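-- pv_equiv track=rewrite | github.com/mooz/algo | vb_code/vb_code.py | vb_decode
-- ===== SOURCE A (Python) =====
-- def vb_decode(lst):
--     decoded = 0
--     offset  = 0
--     for x in reversed(lst):
--         decoded += (x & 127) << offset
--         if x & 128 == 0:
--             break
--         offset += 7
--     return decoded
-- ===== SOURCE B (Python) =====
-- def vb_decode(lst):
--     # Different decomposition: locate the boundary (last byte with the 128-bit
--     # clear) by a backward index scan, then decode the suffix forward with
--     # Horner's method (no explicit shift offsets, no reversed iteration).
--     if not lst:
--         return 0
--     j = len(lst) - 1
--     while j > 0 and lst[j] & 128 != 0: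
--         j -= 1
--     decoded = 0
--     for x in lst[j:]:
--         decoded = decoded * 128 + (x & 127)
--     return decoded
-- ===== Notes on version B (the rewrite author's own statement) =====
-- stated objective: alternative
-- what changed: Replaces the reversed shift-accumulate loop (offset += 7, decoded += (x&127)<<offset with break) by a two-phase decode: a backward index scan that finds the boundary byte (last byte with the 128-bit clear), then a forward Horner fold decoded = decoded*128 + (x&127) over that suffix.
import Mathlib
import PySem

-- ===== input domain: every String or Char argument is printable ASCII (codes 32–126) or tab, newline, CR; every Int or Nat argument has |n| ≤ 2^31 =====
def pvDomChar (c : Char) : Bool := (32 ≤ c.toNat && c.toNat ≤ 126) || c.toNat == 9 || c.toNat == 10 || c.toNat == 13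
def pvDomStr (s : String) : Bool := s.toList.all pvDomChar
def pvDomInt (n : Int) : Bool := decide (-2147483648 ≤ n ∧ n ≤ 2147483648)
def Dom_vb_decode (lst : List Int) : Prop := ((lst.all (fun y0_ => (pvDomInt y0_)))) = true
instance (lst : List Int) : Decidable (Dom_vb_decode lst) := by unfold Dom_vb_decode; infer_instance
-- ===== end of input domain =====

-- B decodes by locating the boundary byte from the end, then a forward Horner fold;
-- A accumulates shifted values while walking the reversed list. Return values proved equal.

-- ===== PORT A =====
-- the for-loop over reversed(lst) with break, state (decoded, offset)
def vbGo : List Int → Int → Nat → Int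
  | [], decoded, _ => decoded
  | x :: xs, decoded, offset =>
    let decoded := decoded + ((PySem.Int.band x 127) <<< offset)
    if PySem.Int.band x 128 = 0 then decoded else vbGo xs decoded (offset + 7)

def vb_decode (lst : List Int) : Int := vbGo lst.reverse 0 0

-- ===== PORT B =====
-- the `while j > 0 and lst[j] & 128 != 0: j -= 1` scan (index j, in range, so getD is exact)
def vbBoundary (lst : List Int) : Nat → Nat
  | 0 => 0
  | j + 1 => if PySem.Int.band (lst.getD (j + 1) 0) 128 ≠ 0 then vbBoundary lst j else j + 1

-- the forward Horner loop `for x in lst[j:]: decoded = decoded*128 + (x & 127)`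
def vbHorner (s : List Int) : Int := s.foldl (fun d x => d * 128 + (PySem.Int.band x 127)) 0

def vb_decode_alt (lst : List Int) : Int :=
  match lst with
  | [] => 0
  | _ :: _ => vbHorner (lst.drop (vbBoundary lst (lst.length - 1)))

-- ===== PRECONDITION & SPEC =====
def Spec_vb_decode (lst : List Int) (out : Int) : Prop := out = vb_decode_alt lst
instance (lst : List Int) (out : Int) : Decidable (Spec_vb_decode lst out) := by unfold Spec_vb_decode; infer_instance

-- ===== CLAIM (what is proved, stated in full; the proofs are below) =====
def Claim_equal_vb_decode : Prop := ∀ (lst : List Int), Dom_vb_decode lst → Spec_vb_decode lst (vb_decode lst)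

-- ===== LEMMAS AND PROOFS =====

-- the value A's loop computes, fused with the break condition (little-endian over the reversed list)
def vbVal : List Int → Int
  | [] => 0
  | x :: xs => (PySem.Int.band x 127) + if PySem.Int.band x 128 = 0 then 0 else 128 * vbVal xs

theorem vbGo_eq (r : List Int) : ∀ (d : Int) (off : Nat),
    vbGo r d off = d + vbVal r * 2 ^ off := by
  induction r with
  | nil => intro d off; simp [vbGo, vbVal]
  | cons x xs ih =>
    intro d off
    by_cases hx : PySem.Int.band x 128 = 0
    · simp [vbGo, vbVal, hx, Int.shiftLeft_eq]
    · simp only [vbGo, vbVal, hx, if_false, if_neg hx, ih, Int.shiftLeft_eq]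
      ring

theorem vbBoundary_le (lst : List Int) : ∀ j, vbBoundary lst j ≤ j := by
  intro j
  induction j with
  | zero => simp [vbBoundary]
  | succ j ih =>
    unfold vbBoundary
    split
    · omega
    · omega

theorem vbBoundary_succ (lst : List Int) (j : Nat) :
    vbBoundary lst (j + 1)
      = if PySem.Int.band (lst.getD (j + 1) 0) 128 ≠ 0 then vbBoundary lst j else j + 1 := rfl

theorem vbBoundary_append (ys : List Int) (x : Int) :
    ∀ j, j < ys.length → vbBoundary (ys ++ [x]) j = vbBoundary ys j := by
  intro j
  induction j with
  | zero => intro _; simp [vbBoundary]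
  | succ j ih =>
    intro hj
    have hget : (ys ++ [x]).getD (j + 1) 0 = ys.getD (j + 1) 0 := by
      simp [List.getD_eq_getElem?_getD, List.getElem?_append_left hj]
    rw [vbBoundary_succ, vbBoundary_succ, hget, ih (by omega)]

theorem getD_snoc_len (ys : List Int) (x : Int) :
    (ys ++ [x]).getD ys.length 0 = x := by
  simp [List.getD_eq_getElem?_getD, List.getElem?_append_right (Nat.le_refl _)]

theorem vbHorner_snoc (s : List Int) (x : Int) :
    vbHorner (s ++ [x]) = vbHorner s * 128 + (PySem.Int.band x 127) := by
  simp [vbHorner]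

theorem vb_main (lst : List Int) : vb_decode lst = vb_decode_alt lst := by
  induction lst using List.reverseRecOn with
  | nil => rfl
  | append_singleton ys x ih =>
    have hA : vb_decode (ys ++ [x]) = vbVal (x :: ys.reverse) := by
      simp [vb_decode, vbGo_eq]
    by_cases hx : PySem.Int.band x 128 = 0
    · -- boundary byte found immediately: suffix is [x]
      have hAx : vb_decode (ys ++ [x]) = PySem.Int.band x 127 := by
        rw [hA]; simp [vbVal, hx]
      cases ys with
      | nil => simpa [vb_decode_alt, vbBoundary, vbHorner] using hAx
      | cons y ys' =>
        have hlen : ((y :: ys') ++ [x]).length - 1 = ys'.length + 1 := by simp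
        have hg : ((y :: ys') ++ [x]).getD (ys'.length + 1) 0 = x := by
          simpa using getD_snoc_len (y :: ys') x
        have hb : vbBoundary ((y :: ys') ++ [x]) (ys'.length + 1) = ys'.length + 1 := by
          rw [vbBoundary_succ, hg]; simp [hx]
        have hdrop : ((y :: ys') ++ [x]).drop (ys'.length + 1) = [x] := by
          have h1 : (ys'.length + 1) = (y :: ys').length := by simp
          rw [h1, List.drop_left]
        have hB : vb_decode_alt ((y :: ys') ++ [x]) = vbHorner [x] := by
          show vbHorner (((y :: ys') ++ [x]).drop
            (vbBoundary ((y :: ys') ++ [x]) (((y :: ys') ++ [x]).length - 1))) = _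
          rw [hlen, hb, hdrop]
        rw [hAx, hB]; simp [vbHorner]
    · -- continuation bit set on the last byte
      have hAx : vb_decode (ys ++ [x]) = 128 * vbVal ys.reverse + PySem.Int.band x 127 := by
        rw [hA]; simp [vbVal, hx]; ring
      have hAy : vb_decode ys = vbVal ys.reverse := by simp [vb_decode, vbGo_eq]
      cases ys with
      | nil =>
        have hB : vb_decode_alt [x] = vbHorner [x] := by
          show vbHorner ([x].drop (vbBoundary [x] 0)) = _
          rfl
        simp only [List.nil_append] at hAx ⊢
        rw [hAx, hB]; simp [vbHorner, vbVal]
      | cons y ys' =>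
        have hlen : ((y :: ys') ++ [x]).length - 1 = ys'.length + 1 := by simp
        have hg : ((y :: ys') ++ [x]).getD (ys'.length + 1) 0 = x := by
          simpa using getD_snoc_len (y :: ys') x
        have hb : vbBoundary ((y :: ys') ++ [x]) (ys'.length + 1)
            = vbBoundary (y :: ys') ys'.length := by
          rw [vbBoundary_succ, hg, if_pos hx]
          exact vbBoundary_append (y :: ys') x ys'.length (by simp)
        have hble : vbBoundary (y :: ys') ys'.length ≤ (y :: ys').length :=
          le_trans (vbBoundary_le _ _) (by simp)
        have hdrop : ((y :: ys') ++ [x]).drop (vbBoundary (y :: ys') ys'.length)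
            = (y :: ys').drop (vbBoundary (y :: ys') ys'.length) ++ [x] :=
          List.drop_append_of_le_length hble
        have hBy : vb_decode_alt (y :: ys')
            = vbHorner ((y :: ys').drop (vbBoundary (y :: ys') ((y :: ys').length - 1))) := rfl
        have hB : vb_decode_alt ((y :: ys') ++ [x])
            = vb_decode_alt (y :: ys') * 128 + PySem.Int.band x 127 := by
          show vbHorner (((y :: ys') ++ [x]).drop
            (vbBoundary ((y :: ys') ++ [x]) (((y :: ys') ++ [x]).length - 1))) = _
          rw [hlen, hb, hdrop, vbHorner_snoc, hBy]
          simp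
        rw [hB, ← ih, hAy, hAx]; ring

-- ===== VERDICT (by name: the statement is the Claim_ definition above) =====
theorem vb_decode_spec : Claim_equal_vb_decode := by
  intro lst _
  unfold Spec_vb_decode
  exact vb_main lst
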